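-- pv_equiv track=rewrite | github.com/asmitapoddar/question-answering-SQuAD2.0-dcn | preprocessing/file_writing.py | get_token_index
-- ===== SOURCE A (Python) =====
-- def get_token_index(char_index, tokens):
--     """
--     Given a char index, returns corresponding token locations.
--     If we're unable to complete the mapping e.g. because of special characters, we return None.
--         e.g. if context = "hello world" and context_tokens = ["hello", "world"] then
--         for 0,1,2,3,4 we return 0 and 6,7,8,9,10 we return 1.
--     """
--     acc = 0 # accumulator
--     token_index=None
--     current_token_index = 0 # current token location
--
--     for current_token in tokens:
--       for current_char in current_token:
--         if acc==char_index:
--           token_index=current_token_index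
--         acc+=1
--       current_token_index+=1
--
--     return token_index
-- ===== SOURCE B (Python) =====
-- def get_token_index(char_index, tokens):
--     """Prefix-sum scan over token lengths with early return (no per-char loop)."""
--     running = 0
--     for i, tok in enumerate(tokens):
--         if running <= char_index < running + len(tok):
--             return i
--         running += len(tok)
--     return None
-- ===== Notes on version B (the rewrite author's own statement) =====
-- stated objective: faster
-- what changed: Replaces the per-character double loop over all tokens with a single pass accumulating token lengths that returns as soon as char_index falls inside the current token's range.
import Mathlib
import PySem

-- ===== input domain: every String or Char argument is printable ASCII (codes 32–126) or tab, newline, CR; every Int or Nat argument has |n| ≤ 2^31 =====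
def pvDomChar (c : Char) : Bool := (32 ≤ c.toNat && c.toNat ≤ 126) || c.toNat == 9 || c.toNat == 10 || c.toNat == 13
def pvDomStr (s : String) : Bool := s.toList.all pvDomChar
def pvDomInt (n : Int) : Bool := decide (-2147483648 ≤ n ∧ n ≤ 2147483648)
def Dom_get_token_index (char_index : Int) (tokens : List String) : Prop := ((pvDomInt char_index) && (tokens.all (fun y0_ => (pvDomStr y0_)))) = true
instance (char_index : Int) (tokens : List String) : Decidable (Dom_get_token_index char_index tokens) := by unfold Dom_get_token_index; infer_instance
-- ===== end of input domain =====

-- B replaces A's per-character double loop with a single early-return scan over token lengths (faster: asymptotic, O(#tokens) vs O(total chars)).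


-- ===== PORT A =====
-- state = (acc, token_index, current_token_index); inner fold over the token's chars
def get_token_index_f (char_index : Int) (s : Int × Option Int × Int) (current_token : String) : Int × Option Int × Int :=
  let inner := current_token.toList.foldl
    (fun (p : Int × Option Int) _ =>
      (p.1 + 1, if p.1 = char_index then some s.2.2 else p.2))
    (s.1, s.2.1)
  (inner.1, inner.2, s.2.2 + 1)

def get_token_index (char_index : Int) (tokens : List String) : Option Int :=
  (tokens.foldl (get_token_index_f char_index) (0, none, 0)).2.1

-- ===== PORT B =====
-- early-return scan over token lengths (running prefix sum)
def get_token_index_alt_go (char_index : Int) (tokens : List String) (running : Int) (i : Int) : Option Int :=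
  match tokens with
  | [] => none
  | tok :: rest =>
    if running ≤ char_index ∧ char_index < running + (tok.toList.length : Int) then some i
    else get_token_index_alt_go char_index rest (running + (tok.toList.length : Int)) (i + 1)

def get_token_index_alt (char_index : Int) (tokens : List String) : Option Int :=
  get_token_index_alt_go char_index tokens 0 0

-- ===== PRECONDITION & SPEC =====
def Spec_get_token_index (char_index : Int) (tokens : List String) (out : Option Int) : Prop := out = get_token_index_alt char_index tokens
instance (char_index : Int) (tokens : List String) (out : Option Int) : Decidable (Spec_get_token_index char_index tokens out) := by unfold Spec_get_token_index; infer_instance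

-- ===== CLAIM (what is proved, stated in full; the proofs are below) =====
def Claim_equal_get_token_index : Prop := ∀ (char_index : Int) (tokens : List String), Dom_get_token_index char_index tokens → Spec_get_token_index char_index tokens (get_token_index char_index tokens)

-- ===== LEMMAS AND PROOFS =====

-- A's inner char loop: bump acc by the length; set token_index iff char_index lies in [a, a+len)
theorem inner_fold_eq (c : Int) (cti : Int) (l : List Char) (a : Int) (t : Option Int) :
    l.foldl (fun (p : Int × Option Int) _ =>
      (p.1 + 1, if p.1 = c then some cti else p.2)) (a, t)
    = (a + l.length, if a ≤ c ∧ c < a + l.length then some cti else t) := by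
  induction l generalizing a t with
  | nil => simp
  | cons x xs ih =>
    simp only [List.foldl_cons, ih, List.length_cons, Prod.mk.injEq]
    constructor
    · push_cast; ring
    · split_ifs <;> push_cast at * <;> first | rfl | omega

-- helper for B: if char_index is already below running, B never matches
theorem go_none (c : Int) (tokens : List String) (a i : Int) (h : c < a) :
    get_token_index_alt_go c tokens a i = none := by
  induction tokens generalizing a i with
  | nil => rfl
  | cons t ts ih =>
    rw [get_token_index_alt_go]
    rw [if_neg (by omega)]
    exact ih _ _ (by have : (0:Int) ≤ (t.toList.length : Int) := Int.natCast_nonneg _; omega)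

-- main invariant relating A's fold state to B's scan
theorem main_inv (c : Int) (tokens : List String) (s : Int × Option Int × Int) :
    (tokens.foldl (get_token_index_f c) s).2.1
    = if s.1 ≤ c then (get_token_index_alt_go c tokens s.1 s.2.2).or s.2.1 else s.2.1 := by
  induction tokens generalizing s with
  | nil => obtain ⟨a, t, cti⟩ := s; cases t <;> simp [get_token_index_alt_go]
  | cons tok ts ih =>
    obtain ⟨a, t, cti⟩ := s
    rw [List.foldl_cons, ih]
    simp only [get_token_index_f, inner_fold_eq]
    rw [get_token_index_alt_go]
    have hlen : (0:Int) ≤ (tok.toList.length : Int) := Int.natCast_nonneg _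
    by_cases h1 : a ≤ c
    · by_cases h2 : c < a + (tok.toList.length : Int)
      · rw [if_pos (⟨h1, h2⟩ : a ≤ c ∧ c < a + (tok.toList.length : Int)),
            if_neg (show ¬ a + (tok.toList.length : Int) ≤ c by omega),
            if_pos h1, if_pos (⟨h1, h2⟩ : a ≤ c ∧ c < a + (tok.toList.length : Int))]
        cases t <;> rfl
      · rw [if_neg (show ¬ (a ≤ c ∧ c < a + (tok.toList.length : Int)) by omega),
            if_pos (show a + (tok.toList.length : Int) ≤ c by omega),
            if_pos h1,
            if_neg (show ¬ (a ≤ c ∧ c < a + (tok.toList.length : Int)) by omega)]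
    · rw [if_neg (show ¬ (a ≤ c ∧ c < a + (tok.toList.length : Int)) by omega),
          if_neg (show ¬ a + (tok.toList.length : Int) ≤ c by omega),
          if_neg h1]

-- ===== VERDICT (by name: the statement is the Claim_ definition above) =====
theorem get_token_index_spec : Claim_equal_get_token_index := by
  intro c tokens _
  show get_token_index c tokens = get_token_index_alt c tokens
  unfold get_token_index get_token_index_alt
  rw [main_inv c tokens (0, none, 0)]
  by_cases h : (0:Int) ≤ c
  · rw [if_pos h]; cases get_token_index_alt_go c tokens 0 0 <;> rfl
  · rw [if_neg h, go_none c tokens 0 0 (by omega)]
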